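-- pv_equiv track=rewrite | github.com/merged-one/canton-collateral-policy-optimization-engine | app/policy-engine/evaluator.py | _asset_decision
-- ===== SOURCE A (Python) =====
-- from typing import Any
--
-- def _asset_decision(reasons: list[dict[str, Any]]) -> str:
--     severities = {reason["severity"] for reason in reasons}
--     if "REJECT" in severities:
--         return "INELIGIBLE"
--     if "ESCALATE" in severities:
--         return "ESCALATE"
--     if "REVIEW" in severities:
--         return "REVIEW"
--     return "ELIGIBLE"
-- ===== SOURCE B (Python) =====
-- def _asset_decision(reasons):
--     _PRIO = {"REJECT": 3, "ESCALATE": 2, "REVIEW": 1}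
--     best = 0
--     for reason in reasons:
--         p = _PRIO.get(reason["severity"], 0)
--         if p > best:
--             best = p
--     if best == 3:
--         return "INELIGIBLE"
--     if best == 2:
--         return "ESCALATE"
--     if best == 1:
--         return "REVIEW"
--     return "ELIGIBLE"
-- ===== Notes on version B (the rewrite author's own statement) =====
-- stated objective: alternative
-- what changed: Replaces the set-building plus ordered membership tests with a single-pass max-priority reduction (severity mapped to 3/2/1/0, maximum kept, then decoded back to the decision string).
import Mathlib
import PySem

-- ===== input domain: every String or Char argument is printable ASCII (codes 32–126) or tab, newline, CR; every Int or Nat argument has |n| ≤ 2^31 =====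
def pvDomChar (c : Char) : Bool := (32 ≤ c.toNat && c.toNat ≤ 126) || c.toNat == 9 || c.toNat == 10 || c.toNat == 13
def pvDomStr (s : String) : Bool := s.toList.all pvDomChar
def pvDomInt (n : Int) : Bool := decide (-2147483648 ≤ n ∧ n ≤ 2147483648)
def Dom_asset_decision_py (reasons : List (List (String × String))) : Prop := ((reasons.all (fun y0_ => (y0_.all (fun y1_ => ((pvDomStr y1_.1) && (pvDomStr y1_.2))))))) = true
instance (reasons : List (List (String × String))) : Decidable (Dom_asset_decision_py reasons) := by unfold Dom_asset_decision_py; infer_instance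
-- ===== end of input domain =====

-- B replaces A's set-building plus ordered membership tests with a one-pass max-priority
-- reduction decoded back to a decision string (alternative decomposition, same cost).


-- ===== PORT A =====
-- reason["severity"]: first-match lookup; the total form getD "" is exact under Pre_ (key present)
def pvSevOf (r : List (String × String)) : String :=
  ((PySem.Dict.mk r).get? "severity").getD ""

def asset_decision_py (reasons : List (List (String × String))) : String :=
  let severities : PySem.Set String := PySem.Set.ofList (reasons.map pvSevOf)
  if "REJECT" ∈ severities then "INELIGIBLE"
  else if "ESCALATE" ∈ severities then "ESCALATE"
  else if "REVIEW" ∈ severities then "REVIEW"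
  else "ELIGIBLE"

-- ===== PORT B =====
def pvPrio (s : String) : Int :=
  if s = "REJECT" then 3 else if s = "ESCALATE" then 2 else if s = "REVIEW" then 1 else 0

def asset_decision_py_alt (reasons : List (List (String × String))) : String :=
  let best := reasons.foldl (fun acc r => max acc (pvPrio (pvSevOf r))) 0
  if best = 3 then "INELIGIBLE"
  else if best = 2 then "ESCALATE"
  else if best = 1 then "REVIEW"
  else "ELIGIBLE"

-- ===== PRECONDITION & SPEC =====
-- Pre_ excludes reasons missing the "severity" key, on which Python A raises KeyError.
def Pre_asset_decision_py (reasons : List (List (String × String))) : Prop :=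
  ∀ r ∈ reasons, (r.any (fun p => p.1 == "severity")) = true
instance (reasons : List (List (String × String))) : Decidable (Pre_asset_decision_py reasons) := by unfold Pre_asset_decision_py; infer_instance

def pvWitness_asset_decision_py : (List (List (String × String))) :=
  [[("severity", "REVIEW"), ("code", "c1")], [("severity", "ESCALATE")]]

def Spec_asset_decision_py (reasons : List (List (String × String))) (out : String) : Prop := out = asset_decision_py_alt reasons
instance (reasons : List (List (String × String))) (out : String) : Decidable (Spec_asset_decision_py reasons out) := by unfold Spec_asset_decision_py; infer_instance

-- ===== CLAIM (what is proved, stated in full; the proofs are below) =====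
def Claim_equal_asset_decision_py : Prop := ∀ (reasons : List (List (String × String))), Dom_asset_decision_py reasons → Pre_asset_decision_py reasons → Spec_asset_decision_py reasons (asset_decision_py reasons)

-- ===== LEMMAS AND PROOFS =====

-- maximum priority of a severity list, foldr form (proof-side normal form of B's loop)
def pvMaxP (l : List String) : Int := l.foldr (fun s a => max (pvPrio s) a) 0

lemma pvPrio_nonneg (s : String) : 0 ≤ pvPrio s := by
  unfold pvPrio; split_ifs <;> omega

lemma pvFoldl_eq_maxP (l : List String) (acc : Int) (hacc : 0 ≤ acc) :
    l.foldl (fun a s => max a (pvPrio s)) acc = max acc (pvMaxP l) := by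
  induction l generalizing acc with
  | nil => simp [pvMaxP]; omega
  | cons s t ih =>
      have h := pvPrio_nonneg s
      rw [List.foldl_cons, ih (max acc (pvPrio s)) (by omega)]
      simp [pvMaxP, max_assoc]

lemma pvMaxP_nonneg (l : List String) : 0 ≤ pvMaxP l := by
  induction l with
  | nil => simp [pvMaxP]
  | cons s t ih => simp only [pvMaxP, List.foldr_cons] at *; omega

lemma pvMaxP_le (l : List String) : pvMaxP l ≤ 3 := by
  induction l with
  | nil => simp [pvMaxP]
  | cons s t ih =>
      simp only [pvMaxP, List.foldr_cons] at *
      have : pvPrio s ≤ 3 := by unfold pvPrio; split_ifs <;> omega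
      omega

lemma pvMaxP_cons (s : String) (t : List String) :
    pvMaxP (s :: t) = max (pvPrio s) (pvMaxP t) := rfl

lemma pvPrio_ge3 (s : String) : 3 ≤ pvPrio s ↔ s = "REJECT" := by
  unfold pvPrio; split_ifs <;> simp_all

lemma pvPrio_ge2 (s : String) : 2 ≤ pvPrio s ↔ s = "REJECT" ∨ s = "ESCALATE" := by
  unfold pvPrio; split_ifs <;> simp_all

lemma pvPrio_ge1 (s : String) : 1 ≤ pvPrio s ↔ s = "REJECT" ∨ s = "ESCALATE" ∨ s = "REVIEW" := by
  unfold pvPrio; split_ifs <;> simp_all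

lemma pvMaxP_ge3 (l : List String) : 3 ≤ pvMaxP l ↔ "REJECT" ∈ l := by
  induction l with
  | nil => simp [pvMaxP]
  | cons s t ih =>
      rw [pvMaxP_cons, le_max_iff, pvPrio_ge3, ih, List.mem_cons]
      tauto

lemma pvMaxP_ge2 (l : List String) : 2 ≤ pvMaxP l ↔ "REJECT" ∈ l ∨ "ESCALATE" ∈ l := by
  induction l with
  | nil => simp [pvMaxP]
  | cons s t ih =>
      rw [pvMaxP_cons, le_max_iff, pvPrio_ge2, ih, List.mem_cons, List.mem_cons]
      tauto

lemma pvMaxP_ge1 (l : List String) : 1 ≤ pvMaxP l ↔ "REJECT" ∈ l ∨ "ESCALATE" ∈ l ∨ "REVIEW" ∈ l := by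
  induction l with
  | nil => simp [pvMaxP]
  | cons s t ih =>
      rw [pvMaxP_cons, le_max_iff, pvPrio_ge1, ih, List.mem_cons, List.mem_cons, List.mem_cons]
      tauto

-- ===== VERDICT (by name: the statement is the Claim_ definition above) =====
theorem asset_decision_py_spec : Claim_equal_asset_decision_py := by
  intro reasons _ _
  unfold Spec_asset_decision_py asset_decision_py asset_decision_py_alt
  have hfold : reasons.foldl (fun acc r => max acc (pvPrio (pvSevOf r))) 0
      = pvMaxP (reasons.map pvSevOf) := by
    have hmm : (List.map (fun r => pvPrio (pvSevOf r)) reasons)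
        = List.map pvPrio (List.map pvSevOf reasons) := by simp [List.map_map]
    rw [← List.foldl_map, hmm, List.foldl_map, pvFoldl_eq_maxP _ _ le_rfl]
    exact max_eq_right (pvMaxP_nonneg _)
  simp only [hfold]
  set l := reasons.map pvSevOf with hl
  have hle := pvMaxP_le l
  have h0 := pvMaxP_nonneg l
  simp only [PySem.Set.mem_ofList]
  by_cases hR : "REJECT" ∈ l
  · have h := (pvMaxP_ge3 l).mpr hR
    have : pvMaxP l = 3 := by omega
    simp [hR, this]
  · by_cases hE : "ESCALATE" ∈ l
    · have h := (pvMaxP_ge2 l).mpr (Or.inr hE)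
      have hn3 : ¬ 3 ≤ pvMaxP l := fun h' => hR ((pvMaxP_ge3 l).mp h')
      have : pvMaxP l = 2 := by omega
      simp [hR, hE, this]
    · by_cases hV : "REVIEW" ∈ l
      · have h := (pvMaxP_ge1 l).mpr (Or.inr (Or.inr hV))
        have hn2 : ¬ 2 ≤ pvMaxP l := fun h' => ((pvMaxP_ge2 l).mp h').elim hR hE
        have : pvMaxP l = 1 := by omega
        simp [hR, hE, hV, this]
      · have hn1 : ¬ 1 ≤ pvMaxP l := fun h' =>
          ((pvMaxP_ge1 l).mp h').elim hR (fun h'' => h''.elim hE hV)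
        have : pvMaxP l = 0 := by omega
        simp [hR, hE, hV, this]
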